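-- pv_equiv track=rewrite | github.com/gp22/Exercises-How-to-Think-Like-a-Computer-Scientist | ch11/ex_11_2.py | only_alpha
-- ===== SOURCE A (Python) =====
-- def only_alpha(the_list):
--     """ returns a copy of the_list with all non-alpha characters \
--         removed, except for ' """
--
--     accepted = 'abcdefghijklmnopqrstuvwxyz\''
--     new_list = []
--     for word in the_list:
--         new_word = ''
--         for char in word:
--             if char in accepted:
--                 new_word += char
--         new_list.append(new_word)
--     return new_list
-- ===== SOURCE B (Python) =====
-- def only_alpha(the_list):
--     """ returns a copy of the_list with all non-alpha characters \
--         removed, except for ' """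
--     new_list = []
--     for word in the_list:
--         pieces = []
--         i = 0
--         n = len(word)
--         while i < n:
--             if "a" <= word[i] <= "z" or word[i] == "'":
--                 j = i
--                 while j < n and ("a" <= word[j] <= "z" or word[j] == "'"):
--                     j += 1
--                 pieces.append(word[i:j])
--                 i = j
--             else:
--                 i += 1
--         new_list.append("".join(pieces))
--     return new_list
-- ===== Notes on version B (the rewrite author's own statement) =====
-- stated objective: alternative
-- what changed: Replaces A's per-character filter (membership test against an accepted string, appending one char at a time) by a two-pointer run-slicing scan: for each word it finds each maximal contiguous run of allowed characters, appends the slice word[i:j] as one piece, and joins the pieces at the end.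
import Mathlib
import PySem

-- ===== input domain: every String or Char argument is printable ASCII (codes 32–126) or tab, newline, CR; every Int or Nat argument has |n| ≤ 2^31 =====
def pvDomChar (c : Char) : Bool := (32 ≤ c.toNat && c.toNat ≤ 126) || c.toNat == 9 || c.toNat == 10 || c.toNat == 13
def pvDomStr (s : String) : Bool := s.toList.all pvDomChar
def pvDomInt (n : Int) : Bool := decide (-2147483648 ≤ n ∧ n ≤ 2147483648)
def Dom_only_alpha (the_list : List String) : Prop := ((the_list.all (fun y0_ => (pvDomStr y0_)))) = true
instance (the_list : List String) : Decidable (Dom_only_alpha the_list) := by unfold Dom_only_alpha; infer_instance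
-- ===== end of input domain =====

-- B replaces A's per-character accumulator loop by a two-pointer scan that slices out each
-- maximal run of allowed characters and joins the slices (alternative; return value only).

-- ===== PORT A =====
def only_alpha (the_list : List String) : List String :=
  let accepted := "abcdefghijklmnopqrstuvwxyz'"
  the_list.foldl
    (fun new_list word =>
      new_list ++ [String.mk (word.toList.foldl
        (fun new_word char =>
          if accepted.toList.contains char then new_word ++ [char] else new_word) [])])
    []

-- ===== PORT B =====
-- the per-character test "a" <= c <= "z" or c == "'"
def pvOkB (c : Char) : Bool := ('a' ≤ c && c ≤ 'z') || c == '\''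

-- inner while: advance j while j < n and word[j] is allowed
def pvScanRun (w : List Char) (n j : Nat) : Nat :=
  if j < n ∧ pvOkB (w.getD j ' ') = true then pvScanRun w n (j + 1) else j
termination_by n - j
decreasing_by omega

-- lower bound on the inner scan, needed by pvStripLoop's termination proof
theorem pvScanRun_ge (w : List Char) (n j : Nat) : j ≤ pvScanRun w n j := by
  have aux : ∀ k j, k = n - j → j ≤ pvScanRun w n j := by
    intro k
    induction k using Nat.strong_induction_on with
    | _ k ih =>
      intro j hk
      rw [pvScanRun]
      split
      · next hc =>
          have := ih (n - (j + 1)) (by omega) (j + 1) rfl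
          omega
      · omega
  exact aux (n - j) j rfl

-- outer while over i: slice out each maximal allowed run word[i:j] as a piece
def pvStripLoop (w : List Char) (n i : Nat) (pieces : List (List Char)) : List (List Char) :=
  if h : i < n then
    if pvOkB (w.getD i ' ') then
      pvStripLoop w n (pvScanRun w n i) (pieces ++ [((w.drop i).take (pvScanRun w n i - i))])
    else
      pvStripLoop w n (i + 1) pieces
  else pieces
termination_by n - i
decreasing_by
  · rename_i hok
    have h2 : pvScanRun w n i = pvScanRun w n (i + 1) := by
      rw [pvScanRun]
      exact if_pos ⟨h, hok⟩
    have h3 := pvScanRun_ge w n (i + 1)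
    omega
  · omega

def pvStripWord (word : String) : String :=
  String.mk (pvStripLoop word.toList word.toList.length 0 []).flatten

def only_alpha_alt (the_list : List String) : List String :=
  the_list.map pvStripWord

-- ===== PRECONDITION & SPEC =====
def Spec_only_alpha (the_list : List String) (out : List String) : Prop := out = only_alpha_alt the_list
instance (the_list : List String) (out : List String) : Decidable (Spec_only_alpha the_list out) := by unfold Spec_only_alpha; infer_instance

-- ===== CLAIM (what is proved, stated in full; the proofs are below) =====
def Claim_equal_only_alpha : Prop := ∀ (the_list : List String), Dom_only_alpha the_list → Spec_only_alpha the_list (only_alpha the_list)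

-- ===== LEMMAS AND PROOFS =====

theorem contains_accepted_eq_ok (c : Char) :
    "abcdefghijklmnopqrstuvwxyz'".toList.contains c = pvOkB c := by
  have hacc : "abcdefghijklmnopqrstuvwxyz'".toList
      = ((List.range 26).map (fun k => Char.ofNat (97 + k))) ++ ['\''] := by decide
  have hfwd : ∀ k, k < 26 → pvOkB (Char.ofNat (97 + k)) = true := by decide
  rw [hacc, Bool.eq_iff_iff]
  simp only [List.contains_eq_mem, decide_eq_true_eq, List.mem_append, List.mem_map,
    List.mem_range, List.mem_cons, List.not_mem_nil, or_false]
  constructor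
  · rintro (⟨k, hk, rfl⟩ | rfl)
    · exact hfwd k hk
    · decide
  · intro hok
    simp only [pvOkB, Bool.or_eq_true, Bool.and_eq_true, decide_eq_true_eq, beq_iff_eq] at hok
    rcases hok with ⟨h1, h2⟩ | rfl
    · left
      have hn1 : 97 ≤ c.toNat := UInt32.le_iff_toNat_le.mp h1
      have hn2 : c.toNat ≤ 122 := UInt32.le_iff_toNat_le.mp h2
      refine ⟨c.toNat - 97, by omega, ?_⟩
      rw [show 97 + (c.toNat - 97) = c.toNat by omega, Char.ofNat_toNat]
    · right; rfl

theorem drop_length_takeWhile_pv (p : Char → Bool) (l : List Char) :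
    List.drop (l.takeWhile p).length l = l.dropWhile p := by
  induction l with
  | nil => simp
  | cons c cs ih =>
    by_cases h : p c = true
    · simp [h, ih]
    · simp [h]

-- pvScanRun j computes j plus the length of the allowed prefix of w.drop j
theorem pvScanRun_eq (w : List Char) (j : Nat) (hj : j ≤ w.length) :
    pvScanRun w w.length j = j + ((w.drop j).takeWhile pvOkB).length := by
  have aux : ∀ k j, k = w.length - j → j ≤ w.length →
      pvScanRun w w.length j = j + ((w.drop j).takeWhile pvOkB).length := by
    intro k
    induction k using Nat.strong_induction_on with
    | _ k ih =>
      intro j hk hj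
      rw [pvScanRun]
      by_cases hlt : j < w.length
      · have hdrop : w.drop j = w[j] :: w.drop (j + 1) := List.drop_eq_getElem_cons hlt
        have hget : w.getD j ' ' = w[j] := List.getD_eq_getElem w ' ' hlt
        by_cases hok : pvOkB w[j] = true
        · rw [if_pos ⟨hlt, by rw [hget]; exact hok⟩]
          rw [ih (w.length - (j + 1)) (by omega) (j + 1) rfl (by omega)]
          rw [hdrop, List.takeWhile_cons, if_pos hok]
          simp; omega
        · rw [if_neg (by rw [hget]; tauto)]
          rw [hdrop, List.takeWhile_cons, if_neg hok]
          simp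
      · rw [if_neg (by tauto)]
        have : w.drop j = [] := List.drop_eq_nil_of_le (by omega)
        simp [this]
  exact aux (w.length - j) j rfl hj

theorem filter_takeWhile_self (p : Char → Bool) (l : List Char) :
    (l.takeWhile p).filter p = l.takeWhile p :=
  List.filter_eq_self.mpr (fun _ h => List.mem_takeWhile_imp h)

-- loop invariant: the joined pieces accumulate exactly the filter of the remaining suffix
theorem pvStripLoop_join (w : List Char) :
    ∀ k i pieces, k = w.length - i → i ≤ w.length →
      (pvStripLoop w w.length i pieces).flatten
        = pieces.flatten ++ (w.drop i).filter pvOkB := by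
  intro k
  induction k using Nat.strong_induction_on with
  | _ k ih =>
    intro i pieces hk hi
    rw [pvStripLoop]
    by_cases hlt : i < w.length
    · rw [dif_pos hlt]
      set d := w.drop i with hd
      have hdlen : d.length = w.length - i := by simp [hd]
      have hscan : pvScanRun w w.length i = i + (d.takeWhile pvOkB).length :=
        pvScanRun_eq w i (by omega)
      have hget : w.getD i ' ' = w[i] := List.getD_eq_getElem w ' ' hlt
      have hdrop : d = w[i] :: w.drop (i + 1) := List.drop_eq_getElem_cons hlt
      by_cases hok : pvOkB w[i] = true
      · rw [if_pos (by rw [hget]; exact hok)]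
        set t := (d.takeWhile pvOkB).length with ht
        have ht1 : 1 ≤ t := by
          rw [ht, hdrop, List.takeWhile_cons, if_pos hok]; simp
        have htle : t ≤ d.length := by
          rw [ht]; exact (List.takeWhile_prefix pvOkB).length_le
        have hpiece : (w.drop i).take (pvScanRun w w.length i - i) = d.takeWhile pvOkB := by
          rw [hscan, ← hd]
          have : i + t - i = t := by omega
          rw [this, ht]
          exact (List.prefix_iff_eq_take.mp (List.takeWhile_prefix pvOkB)).symm
        have hdropj : w.drop (pvScanRun w w.length i) = d.dropWhile pvOkB := by
          rw [hscan, ← List.drop_drop, ← hd, ht]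
          exact drop_length_takeWhile_pv pvOkB d
        rw [ih (w.length - pvScanRun w w.length i) (by omega) _ _ rfl (by omega)]
        rw [hpiece, hdropj]
        have hsplit : d.filter pvOkB
            = d.takeWhile pvOkB ++ (d.dropWhile pvOkB).filter pvOkB := by
          conv_lhs => rw [← List.takeWhile_append_dropWhile (p := pvOkB) (l := d)]
          rw [List.filter_append, filter_takeWhile_self]
        simp [hsplit]
      · rw [if_neg (by rw [hget]; exact hok)]
        rw [ih (w.length - (i + 1)) (by omega) (i + 1) pieces rfl (by omega)]
        rw [show List.filter pvOkB d = List.filter pvOkB (w.drop (i + 1)) from by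
          rw [hdrop, List.filter_cons, if_neg hok]]
    · rw [dif_neg hlt]
      have : w.drop i = [] := List.drop_eq_nil_of_le (by omega)
      simp [this]

theorem pvStripWord_eq_filter (word : String) :
    pvStripWord word = String.mk (word.toList.filter pvOkB) := by
  unfold pvStripWord
  rw [pvStripLoop_join word.toList (word.toList.length - 0) 0 [] rfl (by omega)]
  simp

-- ===== VERDICT (by name: the statement is the Claim_ definition above) =====
theorem only_alpha_spec : Claim_equal_only_alpha := by
  intro the_list _
  unfold Spec_only_alpha only_alpha only_alpha_alt
  rw [PySem.List.foldl_append_singleton_eq_map]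
  apply List.map_congr_left
  intro word _
  rw [pvStripWord_eq_filter]
  congr 1
  simp only [contains_accepted_eq_ok]
  rw [PySem.List.foldl_append_if_eq_filter]
  simp
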